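-- pv_equiv track=rewrite | github.com/TexasThug/Python_works | python_exercises/basics/dictionaries/dict_advanced_exercices#2.py | letter_count_per_word
-- ===== SOURCE A (Python) =====
-- def letter_count_per_word(words):
--     """
--     Exemple :
--     ["hi", "hello"]
--     →
--     {
--         "hi": {"h":1, "i":1},
--         "hello":{"h":1,"e":1,"l":2,"o":1}
--     }
--     """
--     result = {}
--
--     for word in words:
--         freq = {}
--
--         for c in word:
--             if c in freq:
--                 freq[c] += 1
--             else:
--                 freq[c] = 1
--
--         result[word] = freq
--
--     return result
-- ===== SOURCE B (Python) =====
-- def letter_count_per_word(words):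
--     def freq(s):
--         if not s:
--             return {}
--         c = s[0]
--         rest = s.replace(c, "")
--         d = {c: len(s) - len(rest)}
--         d.update(freq(rest))
--         return d
--     return {word: freq(word) for word in words}
-- ===== Notes on version B (the rewrite author's own statement) =====
-- stated objective: alternative
-- what changed: The per-word incrementing-dict scan is replaced by a recursive remove-and-count: take the word's first character, obtain its count as the length drop after deleting all its occurrences with str.replace, and recurse on the shrunken string; no frequency dict is mutated.
import Mathlib
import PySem

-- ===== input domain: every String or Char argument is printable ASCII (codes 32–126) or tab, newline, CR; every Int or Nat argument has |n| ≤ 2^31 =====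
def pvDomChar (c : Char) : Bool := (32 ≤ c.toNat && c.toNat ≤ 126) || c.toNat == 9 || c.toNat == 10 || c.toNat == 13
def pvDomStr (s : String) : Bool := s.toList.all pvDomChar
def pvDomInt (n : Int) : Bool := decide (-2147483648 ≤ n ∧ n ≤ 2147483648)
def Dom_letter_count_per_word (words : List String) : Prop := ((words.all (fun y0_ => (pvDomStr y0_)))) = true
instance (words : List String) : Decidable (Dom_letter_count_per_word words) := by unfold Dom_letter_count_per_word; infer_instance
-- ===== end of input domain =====

-- B replaces A's per-word incrementing-dict scan by a recursive remove-and-count: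
-- the first character's count is the length drop after deleting all its occurrences,
-- then recurse on the shrunken string. Python dict keys that are 1-character strings
-- are represented as Char inside the loops and rendered as String in the items.

-- ===== PORT A =====
-- inner loop: freq[c] += 1 / freq[c] = 1
def pvFreqA (cs : List Char) : List (String × Int) :=
  ((cs.foldl (fun freq c =>
      if freq.contains c then freq.insert c (freq.getD c 0 + 1) else freq.insert c 1)
    (PySem.Dict.empty : PySem.Dict Char Int)).items).map (fun p => (String.mk [p.1], p.2))

def letter_count_per_word (words : List String) : List (String × List (String × Int)) :=
  (words.foldl (fun result word => result.insert word (pvFreqA word.toList))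
    (PySem.Dict.empty : PySem.Dict String (List (String × Int)))).items

-- ===== PORT B =====
-- freq(s): if not s: {}; c = s[0]; rest = s.replace(c, ""); {c: len(s)-len(rest)}, then update with freq(rest).
-- s.replace(c, "") with a 1-char pattern removes every occurrence of c: exact as a filter.
-- (Python binds rest once; the filter term is written twice here only because of the
-- termination elaboration — it is the same value.)
def pvFreqB : List Char → List (String × Int)
  | [] => []
  | c :: tl =>
    (String.mk [c],
      ((c :: tl).length : Int) - (((c :: tl).filter (fun x => !(x == c))).length : Int))
      :: pvFreqB ((c :: tl).filter (fun x => !(x == c)))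
termination_by cs => cs.length
decreasing_by
  exact List.length_filter_lt_length_iff_exists.mpr ⟨c, List.mem_cons_self, by simp⟩

def letter_count_per_word_alt (words : List String) : List (String × List (String × Int)) :=
  (words.foldl (fun result word => result.insert word (pvFreqB word.toList))
    (PySem.Dict.empty : PySem.Dict String (List (String × Int)))).items

-- ===== PRECONDITION & SPEC =====
def Spec_letter_count_per_word (words : List String) (out : List (String × List (String × Int))) : Prop := out = letter_count_per_word_alt words
instance (words : List String) (out : List (String × List (String × Int))) : Decidable (Spec_letter_count_per_word words out) := by unfold Spec_letter_count_per_word; infer_instance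

-- ===== CLAIM (what is proved, stated in full; the proofs are below) =====
def Claim_equal_letter_count_per_word : Prop := ∀ (words : List String), Dom_letter_count_per_word words → Spec_letter_count_per_word words (letter_count_per_word words)

-- ===== LEMMAS AND PROOFS =====
-- A's inner loop is Counter(word)
theorem pvFreqA_eq_counter (cs : List Char) :
    cs.foldl (fun freq c =>
      if freq.contains c then freq.insert c (freq.getD c 0 + 1) else freq.insert c 1)
      (PySem.Dict.empty : PySem.Dict Char Int) = PySem.Dict.counter cs := by
  rw [← PySem.Dict.foldl_insert_getD_add_one_eq_counter]
  apply PySem.List.foldl_congr_mem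
  intro d c _
  by_cases h : d.contains c = true
  · simp [h]
  · simp only [Bool.not_eq_true] at h
    rw [PySem.Dict.getD_of_not_contains (h := h)]
    simp [h]

-- dropping elements equal to an already-present one does not change a Set fold
theorem foldl_add_filter_ne (c : Char) (xs : List Char) (acc : PySem.Set Char)
    (hc : c ∈ acc) :
    xs.foldl PySem.Set.add acc = (xs.filter (fun x => !(x == c))).foldl PySem.Set.add acc := by
  induction xs generalizing acc with
  | nil => rfl
  | cons x xs ih =>
    by_cases hx : x = c
    · subst hx
      rw [List.filter_cons_of_neg (by simp), List.foldl_cons, PySem.Set.add_of_mem hc]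
      exact ih acc hc
    · rw [List.filter_cons_of_pos (by simp [hx]), List.foldl_cons, List.foldl_cons]
      exact ih _ ((PySem.Set.mem_add acc x c).mpr (Or.inl hc))

-- a head character not occurring in the rest stays in front of the Set fold
theorem foldl_add_cons (c : Char) (xs : List Char) (s : List Char)
    (hx : ∀ x ∈ xs, x ≠ c) :
    xs.foldl PySem.Set.add (c :: s) = c :: xs.foldl PySem.Set.add s := by
  induction xs generalizing s with
  | nil => rfl
  | cons x xs ih =>
    have hxc : x ≠ c := hx x List.mem_cons_self
    have hstep : PySem.Set.add (c :: s) x = c :: PySem.Set.add s x := by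
      by_cases hm : x ∈ s
      · rw [PySem.Set.add_of_mem hm, PySem.Set.add_of_mem (List.mem_cons_of_mem _ hm)]
      · have hmc : x ∉ (c :: s : List Char) := by simp [hxc, hm]
        rw [PySem.Set.add_of_not_mem hmc, PySem.Set.add_of_not_mem hm]
        rfl
    rw [List.foldl_cons, hstep, List.foldl_cons,
      ih _ (fun y hy => hx y (List.mem_cons_of_mem _ hy))]

-- first-occurrence dedup satisfies B's remove-and-recurse recursion
theorem dedup_cons_filter (c : Char) (tl : List Char) :
    PySem.List.dedup (c :: tl) = c :: PySem.List.dedup (tl.filter (fun x => !(x == c))) := by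
  show (c :: tl).foldl PySem.Set.add PySem.Set.empty
      = c :: (tl.filter (fun x => !(x == c))).foldl PySem.Set.add PySem.Set.empty
  rw [List.foldl_cons]
  have h1 : PySem.Set.add (PySem.Set.empty : PySem.Set Char) c = [c] := rfl
  rw [h1, foldl_add_filter_ne c tl [c] (List.mem_singleton.mpr rfl)]
  exact foldl_add_cons c _ [] (by intro x hxmem; simpa using (List.mem_filter.mp hxmem).2)

-- B's recursion computes the dedup/count closed form
-- counting c and deleting all c's partition a list's length
theorem count_add_filter_length (c : Char) (l : List Char) :
    List.count c l + (l.filter (fun x => !(x == c))).length = l.length := by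
  induction l with
  | nil => rfl
  | cons a l ih =>
    by_cases h : a = c
    · subst h
      have h1 : List.count a (a :: l) = List.count a l + 1 := List.count_cons_self
      rw [h1, List.filter_cons_of_neg (by simp)]
      simp only [List.length_cons]
      omega
    · have h1 : List.count c (a :: l) = List.count c l := by
        simp [List.count_cons, h, Ne.symm h]
      rw [h1, List.filter_cons_of_pos (by simp [h])]
      simp only [List.length_cons]
      omega

theorem pvFreqB_eq (cs : List Char) :
    pvFreqB cs = (PySem.List.dedup cs).map (fun k => (String.mk [k], (cs.count k : Int))) := by
  induction cs using pvFreqB.induct with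
  | case1 => simp [pvFreqB]
  | case2 c tl ih =>
    have hfc : (c :: tl).filter (fun x => !(x == c)) = tl.filter (fun x => !(x == c)) :=
      List.filter_cons_of_neg (by simp)
    rw [hfc] at ih
    rw [pvFreqB, hfc, dedup_cons_filter, List.map_cons, ih]
    have key := count_add_filter_length c tl
    have hhead : ((c :: tl).length : Int) - ((tl.filter (fun x => !(x == c))).length : Int)
        = ((c :: tl).count c : Int) := by
      rw [List.count_cons_self]
      simp only [List.length_cons]
      push_cast
      omega
    rw [hhead]
    congr 1
    apply List.map_congr_left
    intro k hk
    have hkf : k ∈ tl.filter (fun x => !(x == c)) := by simpa using hk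
    have hkc : k ≠ c := by simpa using (List.mem_filter.mp hkf).2
    have h2 : List.count k (tl.filter (fun x => !(x == c))) = List.count k tl :=
      List.count_filter (by simp [hkc])
    rw [h2]
    simp [List.count_cons, hkc, Ne.symm hkc]

theorem pvFreq_eq (cs : List Char) : pvFreqA cs = pvFreqB cs := by
  unfold pvFreqA
  rw [pvFreqA_eq_counter, PySem.Dict.items_counter, pvFreqB_eq]
  simp [List.map_map, Function.comp, PySem.List.dedup]

-- ===== VERDICT (by name: the statement is the Claim_ definition above) =====
theorem letter_count_per_word_spec : Claim_equal_letter_count_per_word := by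
  intro words _
  unfold Spec_letter_count_per_word letter_count_per_word letter_count_per_word_alt
  congr 1
  apply PySem.List.foldl_congr_mem
  intro d w _
  rw [pvFreq_eq]
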